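-- pv_equiv track=rewrite | github.com/Xiangyu7/Unscripted | backend/systems/tension_system.py | _count_consecutive_rises
-- ===== SOURCE A (Python) =====
-- from typing import Dict, List
--
-- def _count_consecutive_rises(history: List[int]) -> int:
--     """
--     Count how many consecutive tension increases have occurred at the
--     end of the history.
--
--     Returns 0 if history has fewer than 2 entries.
--     """
--     if len(history) < 2:
--         return 0
--
--     count = 0
--     for i in range(len(history) - 1, 0, -1):
--         if history[i] > history[i - 1]:
--             count += 1
--         else:
--             break
--
--     return count
-- ===== SOURCE B (Python) =====
-- def _count_consecutive_rises(history):
--     count = 0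
--     for i in range(1, len(history)):
--         count = count + 1 if history[i] > history[i - 1] else 0
--     return count
-- ===== Notes on version B (the rewrite author's own statement) =====
-- stated objective: simpler
-- what changed: B replaces A's backward loop with an early break (plus a length guard) by a single forward pass with a reset accumulator and no guard: count += 1 on a rise, reset to 0 otherwise; the trailing run survives the last reset.
import Mathlib
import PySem

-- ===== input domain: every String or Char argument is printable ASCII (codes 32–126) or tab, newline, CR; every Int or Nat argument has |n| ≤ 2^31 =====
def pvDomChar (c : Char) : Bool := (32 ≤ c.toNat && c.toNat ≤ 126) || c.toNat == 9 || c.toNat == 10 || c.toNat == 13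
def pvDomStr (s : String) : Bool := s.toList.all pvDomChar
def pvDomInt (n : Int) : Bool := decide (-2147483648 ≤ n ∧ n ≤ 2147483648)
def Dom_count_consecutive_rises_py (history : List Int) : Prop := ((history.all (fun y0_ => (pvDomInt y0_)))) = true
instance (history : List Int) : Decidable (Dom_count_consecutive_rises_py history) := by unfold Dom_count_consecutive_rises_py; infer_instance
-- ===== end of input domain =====

-- B changes the decomposition: a forward single pass with a reset accumulator (no length
-- guard, no break) instead of A's guarded backward loop that breaks at the first non-rise.

-- ===== PORT A =====
-- A's backward loop 'for i in range(len(history)-1, 0, -1)' with break: structural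
-- recursion on the index i counting down; the 'else: break' returns the count so far.
def pvAGo (history : List Int) : Nat → Int → Int
  | 0, count => count
  | i + 1, count =>
      if PySem.List.pyGetD history ((i : Int) + 1) 0 > PySem.List.pyGetD history (i : Int) 0 then
        pvAGo history i (count + 1)
      else count

def count_consecutive_rises_py (history : List Int) : Int :=
  if history.length < 2 then 0
  else pvAGo history (history.length - 1) 0

-- ===== PORT B =====
def count_consecutive_rises_py_alt (history : List Int) : Int :=
  (PySem.List.pyRange 1 (history.length : Int) 1).foldl
    (fun count i =>
      if PySem.List.pyGetD history i 0 > PySem.List.pyGetD history (i - 1) 0 then count + 1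
      else 0) 0

-- ===== PRECONDITION & SPEC =====
def Spec_count_consecutive_rises_py (history : List Int) (out : Int) : Prop := out = count_consecutive_rises_py_alt history
instance (history : List Int) (out : Int) : Decidable (Spec_count_consecutive_rises_py history out) := by unfold Spec_count_consecutive_rises_py; infer_instance

-- ===== CLAIM (what is proved, stated in full; the proofs are below) =====
def Claim_equal_count_consecutive_rises_py : Prop := ∀ (history : List Int), Dom_count_consecutive_rises_py history → Spec_count_consecutive_rises_py history (count_consecutive_rises_py history)

-- ===== LEMMAS AND PROOFS =====

-- A's loop only ever adds to the accumulator, so the accumulator factors out.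
theorem pvAGo_add (history : List Int) (k : Nat) (c : Int) :
    pvAGo history k c = c + pvAGo history k 0 := by
  induction k generalizing c with
  | zero => simp [pvAGo]
  | succ i ih =>
      simp only [pvAGo]
      split
      · rw [ih (c + 1), ih (0 + 1)]; ring
      · simp

-- B's fold over range(1, k+1) computes A's backward count from index k.
theorem pvFold_eq_aGo (history : List Int) (k : Nat) :
    (PySem.List.pyRange 1 ((k : Int) + 1) 1).foldl
      (fun count i =>
        if PySem.List.pyGetD history i 0 > PySem.List.pyGetD history (i - 1) 0 then count + 1
        else 0) 0 = pvAGo history k 0 := by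
  induction k with
  | zero => simp [PySem.List.pyRange, pvAGo]
  | succ i ih =>
      have hr : PySem.List.pyRange 1 ((↑(i + 1) : Int) + 1) 1
          = PySem.List.pyRange 1 ((↑i : Int) + 1) 1 ++ [((↑i : Int) + 1)] := by
        have := PySem.List.pyRange_one_succ_right (a := 1) (b := (↑i : Int) + 1) (by omega)
        simpa [add_comm, add_left_comm] using this
      rw [hr, List.foldl_append, ih]
      have h1 : ((↑i : Int) + 1) - 1 = (↑i : Int) := by ring
      simp only [List.foldl, h1]
      show _ = pvAGo history (i + 1) 0
      simp only [pvAGo]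
      split
      · rw [pvAGo_add history i (0 + 1)]; ring
      · rfl

-- ===== VERDICT (by name: the statement is the Claim_ definition above) =====
theorem count_consecutive_rises_py_spec : Claim_equal_count_consecutive_rises_py := by
  intro history _
  unfold Spec_count_consecutive_rises_py count_consecutive_rises_py count_consecutive_rises_py_alt
  split
  · -- len < 2: range(1, len) is empty, so B's fold is 0 too
    rename_i h
    interval_cases hl : history.length <;> simp_all [PySem.List.pyRange]
  · rename_i h
    have hk : (history.length : Int) = ((history.length - 1 : Nat) : Int) + 1 := by omega
    rw [hk, pvFold_eq_aGo]
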